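-- pv_equiv track=rewrite | github.com/swoop-there-it-is/advent_of_code_2024 | day_one/historian_hysteria.py | _get_location_ids
-- ===== SOURCE A (Python) =====
-- from typing import List
--
-- def _get_location_ids(data: str) -> (List[int], List[int]):
--     location_ids = data.split()
--     list_one = []
--     list_two = []
--     for index, location_id in enumerate(location_ids):
--         location_id = int(location_id)
--         if index % 2 == 0:
--             list_one.append(location_id)
--             continue
--         list_two.append(location_id)
--     return list_one, list_two
-- ===== SOURCE B (Python) =====
-- from typing import List
--
-- def _get_location_ids(data: str) -> (List[int], List[int]):
--     nums = [int(x) for x in data.split()]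
--     return nums[0::2], nums[1::2]
-- ===== Notes on version B (the rewrite author's own statement) =====
-- stated objective: idiomatic
-- what changed: Parse all tokens into one list first, then partition by extended slicing with stride 2 (nums[0::2], nums[1::2]) instead of an interleaved index-parity loop with two accumulators.
import Mathlib
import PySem

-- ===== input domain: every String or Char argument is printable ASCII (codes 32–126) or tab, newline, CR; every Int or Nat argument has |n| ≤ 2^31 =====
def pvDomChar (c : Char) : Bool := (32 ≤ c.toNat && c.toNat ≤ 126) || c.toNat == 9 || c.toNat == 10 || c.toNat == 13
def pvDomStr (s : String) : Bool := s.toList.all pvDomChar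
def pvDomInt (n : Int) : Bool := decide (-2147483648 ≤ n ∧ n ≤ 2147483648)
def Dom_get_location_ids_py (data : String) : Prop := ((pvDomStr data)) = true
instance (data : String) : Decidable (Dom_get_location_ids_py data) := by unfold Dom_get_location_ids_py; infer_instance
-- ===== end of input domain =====

-- ===== PORT A =====
-- B changes only the decomposition (parse-then-slice vs interleaved parity loop); no speed claim.
-- Pre_ excludes inputs with a token int() cannot parse, on which the Python A raises ValueError.
def get_location_ids_py (data : String) : List Int × List Int :=
  let location_ids := PySem.Str.split₀ data
  (PySem.List.enumerate location_ids 0).foldl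
    (fun (acc : List Int × List Int) p =>
      let location_id := (PySem.Int.ofStr? p.2).getD 0   -- Pre_ guarantees the parse succeeds
      if PySem.Int.mod p.1 2 = 0 then (acc.1 ++ [location_id], acc.2)
      else (acc.1, acc.2 ++ [location_id]))
    ([], [])

-- ===== PORT B =====
def get_location_ids_py_alt (data : String) : List Int × List Int :=
  let nums := (PySem.Str.split₀ data).map (fun x => (PySem.Int.ofStr? x).getD 0)
  ((PySem.List.slice? nums (some 0) none 2).getD [],
   (PySem.List.slice? nums (some 1) none 2).getD [])

-- ===== PRECONDITION & SPEC =====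
-- Pre_ excludes exactly the inputs where some whitespace-token is not int()-parsable: there A raises ValueError (B does too).
def Pre_get_location_ids_py (data : String) : Prop :=
  ∀ t ∈ PySem.Str.split₀ data, (PySem.Int.ofStr? t).isSome = true
instance (data : String) : Decidable (Pre_get_location_ids_py data) := by unfold Pre_get_location_ids_py; infer_instance
def pvWitness_get_location_ids_py : String := " 3 4 2 1_0 +3 -3 "
def Spec_get_location_ids_py (data : String) (out : List Int × List Int) : Prop := out = get_location_ids_py_alt data
instance (data : String) (out : List Int × List Int) : Decidable (Spec_get_location_ids_py data out) := by unfold Spec_get_location_ids_py; infer_instance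

-- ===== CLAIM (what is proved, stated in full; the proofs are below) =====
def Claim_equal_get_location_ids_py : Prop := ∀ (data : String), Dom_get_location_ids_py data → Pre_get_location_ids_py data → Spec_get_location_ids_py data (get_location_ids_py data)

-- ===== LEMMAS AND PROOFS =====

-- the mutual "unzip by parity" shape both results reduce to
def pvUz : List Int → List Int × List Int
  | [] => ([], [])
  | a :: t => ((a :: (pvUz t).2), (pvUz t).1)

lemma pv_step1 (a : Int) (t : List Int) :
    PySem.List.slice? (a :: t) (some 1) none 2 = PySem.List.slice? t (some 0) none 2 := by
  simp [PySem.List.slice?, PySem.List.sliceIndices]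
  refine List.filterMap_congr ?_
  intro k _
  have h1 : ((1:Int) + 2 * k).toNat = 2 * k + 1 := by omega
  have h2 : ((2:Int) * k).toNat = 2 * k := by omega
  rw [h1, h2, List.getElem?_cons_succ]

lemma pv_step0 (a : Int) (t : List Int) :
    PySem.List.slice? (a :: t) (some 0) none 2 =
      (PySem.List.slice? t (some 1) none 2).map (a :: ·) := by
  cases t with
  | nil => simp [PySem.List.slice?, PySem.List.sliceIndices]
  | cons b t' =>
    simp [PySem.List.slice?, PySem.List.sliceIndices]
    have hL : (if 0 ≤ (t'.length:Int) + 1 then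
          (((t'.length:Int) + 1 + 1 - min 0 ((t'.length:Int) + 1 + 1) + 2 - 1) / 2).toNat else 0)
        = (if 0 < t'.length then (((t'.length:Int) + 2 - 1) / 2).toNat else 0) + 1 := by
      split_ifs <;> omega
    rw [hL, List.range_succ_eq_map, List.filterMap_cons, List.filterMap_map]
    have h0 : ((min (0:Int) ((t'.length:Int) + 1 + 1)) + 2 * (0:Nat)).toNat = 0 := by omega
    simp only [h0, List.getElem?_cons_zero]
    refine congrArg _ (List.filterMap_congr ?_)
    intro k _
    have e1 : (min (0:Int) ((t'.length:Int) + 1 + 1) + 2 * (↑(k.succ))).toNat = 2*k+2 := by omega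
    have e2 : ((1:Int) + 2 * ↑k).toNat = 2*k+1 := by omega
    simp only [Function.comp_apply, e1, e2]
    simp [List.getElem?_cons_succ]

lemma pv_slices (nums : List Int) :
    PySem.List.slice? nums (some 0) none 2 = some (pvUz nums).1 ∧
    PySem.List.slice? nums (some 1) none 2 = some (pvUz nums).2 := by
  induction nums with
  | nil => constructor <;> decide
  | cons a t ih =>
    refine ⟨?_, ?_⟩
    · rw [pv_step0, ih.2]; rfl
    · rw [pv_step1, ih.1]; rfl

lemma pv_fold (ids : List String) (s : Int) (acc : List Int × List Int) :
    (PySem.List.enumerate ids s).foldl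
      (fun (acc : List Int × List Int) p =>
        let v := (PySem.Int.ofStr? p.2).getD 0
        if PySem.Int.mod p.1 2 = 0 then (acc.1 ++ [v], acc.2)
        else (acc.1, acc.2 ++ [v]))
      acc =
    (let nums := ids.map (fun x => (PySem.Int.ofStr? x).getD 0)
     if PySem.Int.mod s 2 = 0 then (acc.1 ++ (pvUz nums).1, acc.2 ++ (pvUz nums).2)
     else (acc.1 ++ (pvUz nums).2, acc.2 ++ (pvUz nums).1)) := by
  induction ids generalizing s acc with
  | nil => simp [PySem.List.enumerate_nil, pvUz]
  | cons x rest ih =>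
    rw [PySem.List.enumerate_cons, List.foldl_cons, ih]
    have hf : ∀ a : Int, PySem.Int.mod a 2 = a % 2 := by
      intro a; simp [PySem.Int.mod, Int.fmod_eq_emod]
    have hpar : PySem.Int.mod s 2 = 0 ∨ PySem.Int.mod s 2 = 1 := by
      rw [hf]; omega
    have hsucc0 : PySem.Int.mod s 2 = 0 → PySem.Int.mod (s + 1) 2 = 1 := by
      rw [hf, hf]; omega
    have hsucc1 : PySem.Int.mod s 2 = 1 → PySem.Int.mod (s + 1) 2 = 0 := by
      rw [hf, hf]; omega
    rcases hpar with h | h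
    · simp only [h, hsucc0 h]; norm_num [pvUz]
    · simp only [h, hsucc1 h]; norm_num [pvUz]

-- ===== VERDICT (by name: the statement is the Claim_ definition above) =====
theorem get_location_ids_py_spec : Claim_equal_get_location_ids_py := by
  intro data _ _
  unfold Spec_get_location_ids_py get_location_ids_py get_location_ids_py_alt
  rw [pv_fold]
  simp [(pv_slices _).1, (pv_slices _).2, PySem.Int.mod]
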